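-- pv_equiv track=rewrite | github.com/biankabakullari/UncertainLogProbabilities | code/Trace_Realizations_Alg/combine_With_swapping.py | interweave
-- ===== SOURCE A (Python) =====
-- def interweave(sb, s, start_pos=0):
--     if not sb:  # if sb is empty, you are done
--         return [s]
--
--     sequences = []
--     event = sb[0]
--     for pos in range(start_pos, len(s) + 1):
--         s_new = s.copy()
--         s_new.insert(pos, event)
--         sequences += interweave(sb[1:], s_new, pos + 1)
--     return sequences
-- ===== SOURCE B (Python) =====
-- def _merge(sb, s):
--     # all interleavings of sb into s, sb's head tried first
--     if not sb:
--         return [list(s)]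
--     if not s:
--         return [list(sb)]
--     first = [[sb[0]] + m for m in _merge(sb[1:], s)]
--     second = [[s[0]] + m for m in _merge(sb, s[1:])]
--     return first + second
--
-- def interweave(sb, s, start_pos=0):
--     if not sb:
--         return [s]
--     if start_pos > len(s):
--         return []  # no insertion position >= start_pos exists
--     return [s[:start_pos] + m for m in _merge(sb, s[start_pos:])]
-- ===== Notes on version B (the rewrite author's own statement) =====
-- stated objective: alternative
-- what changed: Replaced the insert-at-every-position recursion with a two-sequence merge recursion (head of sb first, then head of the tail) over the tail s[start_pos:], prepending the fixed prefix s[:start_pos] to every result.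
-- intended difference: For nonempty sb with negative start_pos, A's list.insert negative-index wraparound makes it emit duplicated and misplaced interleavings (e.g. [['a'],['a']] for sb=['a'], s=[], start_pos=-1), while B interprets start_pos as the Python slice position from the end and returns each interleaving once, which is the intended set of realizations. — e.g. on interweave(["a"], [], -1): A returns [["a"], ["a"]], B returns [["a"]]
import Mathlib
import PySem

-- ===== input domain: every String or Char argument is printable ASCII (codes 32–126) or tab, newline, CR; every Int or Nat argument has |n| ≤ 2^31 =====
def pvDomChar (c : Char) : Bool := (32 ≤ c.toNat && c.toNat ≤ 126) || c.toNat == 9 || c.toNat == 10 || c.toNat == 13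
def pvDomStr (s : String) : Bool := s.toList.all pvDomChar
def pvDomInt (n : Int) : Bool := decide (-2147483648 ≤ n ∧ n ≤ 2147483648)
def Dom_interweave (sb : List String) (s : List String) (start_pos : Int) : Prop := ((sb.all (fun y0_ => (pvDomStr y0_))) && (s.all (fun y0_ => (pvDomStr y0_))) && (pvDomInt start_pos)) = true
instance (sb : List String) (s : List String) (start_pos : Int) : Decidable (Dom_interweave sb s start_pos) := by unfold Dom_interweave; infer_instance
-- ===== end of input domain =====

-- B replaces the insert-at-every-position recursion by a two-sequence merge recursion on
-- the tail s[start_pos:], prepending the fixed prefix s[:start_pos] (objective: alternative).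

-- ===== PORT A =====
def interweave (sb : List String) (s : List String) (start_pos : Int) : List (List String) :=
  match sb with
  | [] => [s]
  | event :: rest =>
    (PySem.List.pyRange start_pos ((s.length : Int) + 1) 1).foldl
      (fun sequences pos =>
        sequences ++ interweave rest (PySem.List.insert s pos event) (pos + 1)) []
termination_by structural sb

-- ===== PORT B =====
def pvMerge (sb : List String) (s : List String) : List (List String) :=
  match sb, s with
  | [], s => [s]
  | sb, [] => [sb]
  | b :: bs, x :: xs =>
      (pvMerge bs (x :: xs)).map (fun m => b :: m) ++ (pvMerge (b :: bs) xs).map (fun m => x :: m)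
termination_by sb.length + s.length

def interweave_alt (sb : List String) (s : List String) (start_pos : Int) : List (List String) :=
  if sb = [] then [s]
  else if (s.length : Int) < start_pos then []  -- no insertion position >= start_pos exists
  else
    (pvMerge sb (PySem.List.slice s (some start_pos) none)).map
      (fun m => PySem.List.slice s none (some start_pos) ++ m)

-- ===== PRECONDITION & SPEC =====
-- For nonempty sb with negative start_pos, A's list.insert negative-index wraparound makes it
-- emit duplicated and misplaced interleavings (e.g. [['a'],['a']] for sb=['a'], s=[],
-- start_pos=-1), while B interprets start_pos as the Python slice position from the end and
-- returns each interleaving once, which is the intended set of realizations.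
def D_interweave (sb : List String) (s : List String) (start_pos : Int) : Prop :=
  sb ≠ [] ∧ start_pos < 0
instance (sb : List String) (s : List String) (start_pos : Int) : Decidable (D_interweave sb s start_pos) := by unfold D_interweave; infer_instance

def Spec_interweave (sb : List String) (s : List String) (start_pos : Int) (out : List (List String)) : Prop := ¬ D_interweave sb s start_pos → out = interweave_alt sb s start_pos
instance (sb : List String) (s : List String) (start_pos : Int) (out : List (List String)) : Decidable (Spec_interweave sb s start_pos out) := by unfold Spec_interweave; infer_instance

def pvDiffWitness_interweave : List String × List String × Int := (["a"], [], -1)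
def pvDiffWitnessOut_interweave : (List (List String)) × (List (List String)) := ([["a"], ["a"]], [["a"]])

-- ===== CLAIM (what is proved, stated in full; the proofs are below) =====
def Claim_unchanged_interweave : Prop := ∀ (sb : List String) (s : List String) (start_pos : Int), Dom_interweave sb s start_pos → Spec_interweave sb s start_pos (interweave sb s start_pos)
def Claim_changed_interweave : Prop := Dom_interweave (pvDiffWitness_interweave.1) (pvDiffWitness_interweave.2.1) (pvDiffWitness_interweave.2.2) ∧ D_interweave (pvDiffWitness_interweave.1) (pvDiffWitness_interweave.2.1) (pvDiffWitness_interweave.2.2) ∧ interweave (pvDiffWitness_interweave.1) (pvDiffWitness_interweave.2.1) (pvDiffWitness_interweave.2.2) = pvDiffWitnessOut_interweave.1 ∧ interweave_alt (pvDiffWitness_interweave.1) (pvDiffWitness_interweave.2.1) (pvDiffWitness_interweave.2.2) = pvDiffWitnessOut_interweave.2 ∧ pvDiffWitnessOut_interweave.1 ≠ pvDiffWitnessOut_interweave.2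

-- ===== LEMMAS AND PROOFS =====

theorem pvMerge_nil_right (r : List String) : pvMerge r [] = [r] := by
  cases r <;> simp [pvMerge]

theorem interweave_cons_split (e : String) (rest s : List String) (k : Int)
    (h : k < (s.length : Int) + 1) :
    interweave (e :: rest) s k =
      interweave rest (PySem.List.insert s k e) (k + 1) ++ interweave (e :: rest) s (k + 1) := by
  rw [interweave, interweave, PySem.List.pyRange_one_cons h]
  rw [List.foldl_cons, PySem.List.foldl_append_eq_flatMap, PySem.List.foldl_append_eq_flatMap]
  simp

theorem interweave_cons_empty (e : String) (rest s : List String) (k : Int)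
    (h : (s.length : Int) + 1 ≤ k) :
    interweave (e :: rest) s k = [] := by
  rw [interweave, PySem.List.pyRange_one_eq_nil h]
  simp

theorem pvMain (sb s : List String) (k : Nat) (h : k ≤ s.length) :
    interweave sb s (k : Int) = (pvMerge sb (s.drop k)).map (fun m => s.take k ++ m) := by
  match sb with
  | [] => simp [interweave, pvMerge]
  | e :: rest =>
    have hlt : (k : Int) < (s.length : Int) + 1 := by omega
    have hins : PySem.List.insert s (k : Int) e = s.take k ++ e :: s.drop k :=
      PySem.List.insert_natCast s k e h
    have hlen_take : (s.take k).length = k := List.length_take_of_le h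
    have hdropt : (s.take k ++ e :: s.drop k).drop (k + 1) = s.drop k := by
      rw [show k + 1 = (s.take k).length + 1 from by omega]
      simp [List.drop_append]
    have htaket : (s.take k ++ e :: s.drop k).take (k + 1) = s.take k ++ [e] := by
      rw [show k + 1 = (s.take k).length + 1 from by omega]
      simp [List.take_append]
    have h1 : interweave rest (PySem.List.insert s (k : Int) e) ((k : Int) + 1) =
        (pvMerge rest (s.drop k)).map (fun m => (s.take k ++ [e]) ++ m) := by
      have := pvMain rest (s.take k ++ e :: s.drop k) (k + 1)
        (by simp; omega)
      rw [hins]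
      have hcast : ((k : Int) + 1) = ((k + 1 : Nat) : Int) := by push_cast; ring
      rw [hcast, this, hdropt, htaket]
    rw [interweave_cons_split e rest s (k : Int) hlt, h1]
    rcases Nat.lt_or_ge k s.length with hk | hk
    · -- k < s.length : tail is nonempty
      have hdrop : s.drop k = s[k] :: s.drop (k + 1) := List.drop_eq_getElem_cons hk
      have h2 : interweave (e :: rest) s ((k : Int) + 1) =
          (pvMerge (e :: rest) (s.drop (k + 1))).map (fun m => (s.take k ++ [s[k]]) ++ m) := by
        have := pvMain (e :: rest) s (k + 1) (by omega)
        have hcast : ((k : Int) + 1) = ((k + 1 : Nat) : Int) := by push_cast; ring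
        have htk : s.take (k + 1) = s.take k ++ [s[k]] := by
          rw [List.take_add_one]
          simp [List.getElem?_eq_getElem hk]
        rw [hcast, this, htk]
      rw [h2, hdrop, pvMerge]
      rw [List.map_append, List.map_map, List.map_map]
      congr 1
      · exact List.map_congr_left (fun m _ => by simp)
      · exact List.map_congr_left (fun m _ => by simp only [Function.comp_apply, List.append_assoc, List.singleton_append])
    · -- k = s.length : tail is empty
      have hk' : k = s.length := by omega
      have h2 : interweave (e :: rest) s ((k : Int) + 1) = [] := by
        apply interweave_cons_empty
        omega
      rw [h2, List.append_nil]
      have hdnil : s.drop k = [] := by simp [hk']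
      rw [hdnil, pvMerge_nil_right, pvMerge_nil_right]
      simp
termination_by (sb.length, s.length - k)
decreasing_by
  · exact Prod.Lex.left _ _ (by simp)
  · exact Prod.Lex.right _ (by omega)

-- ===== VERDICT (by name: the statement is the Claim_ definition above) =====
theorem interweave_spec : Claim_unchanged_interweave := by
  intro sb s start_pos _ hnd
  unfold D_interweave at hnd
  unfold interweave_alt
  match sb with
  | [] => rw [interweave]; simp
  | e :: rest =>
    have h0 : 0 ≤ start_pos := by
      by_contra hneg
      exact hnd ⟨by simp, by omega⟩
    simp only [if_neg (by simp : ¬(e :: rest = []))]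
    rcases lt_or_ge (s.length : Int) start_pos with hgt | hle
    · rw [if_pos hgt]
      exact interweave_cons_empty e rest s start_pos (by omega)
    · rw [if_neg (by omega)]
      obtain ⟨k, rfl⟩ : ∃ k : Nat, start_pos = (k : Int) := ⟨start_pos.toNat, by omega⟩
      have hk : k ≤ s.length := by exact_mod_cast hle
      rw [PySem.List.slice_to s h0, PySem.List.slice_from s h0]
      simp only [Int.toNat_natCast]
      exact pvMain (e :: rest) s k hk

theorem interweave_changed : Claim_changed_interweave := by
  unfold Claim_changed_interweave
  refine ⟨by decide, by decide, by decide, ?_, by decide⟩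
  show interweave_alt ["a"] [] (-1) = [["a"]]
  have h1 : PySem.List.slice ([] : List String) (some (-1)) none = [] := by
    rw [PySem.List.slice_from_neg_one]
    simp
  have h2 : PySem.List.slice ([] : List String) none (some (-1)) = [] := by
    rw [PySem.List.slice_to_neg_one]
    simp
  rw [interweave_alt]
  simp [h1, h2, pvMerge_nil_right]
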